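-- pv_equiv track=rewrite | github.com/ghc/ghc | testsuite/tests/driver/multipleHomeUnits/gen-home-unit-dag.py | deps_for
-- ===== SOURCE A (Python) =====
-- def deps_for(i: int) -> list[int]:
--     if i <= 1:
--         return []
--
--     target = min(100, i - 1)
--
--     # Start with a sliding window of the most recent predecessors. This makes
--     # later units dense while keeping the graph acyclic.
--     start = max(1, i - target)
--     result = list(range(start, i))
--
--     # For larger graphs, mix in a few long-range edges and then refill from the
--     # end to keep at least `target` dependencies after deduplication.
--     extras = [i // 2, i // 3, i // 4, i // 5, i // 8]
--     seen = set()
--     dense = []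
--     for dep in extras + result:
--         if 1 <= dep < i and dep not in seen:
--             seen.add(dep)
--             dense.append(dep)
--
--     dep = i - 1
--     while len(dense) < target:
--         if dep not in seen:
--             seen.add(dep)
--             dense.append(dep)
--         dep -= 1
--
--     dense.sort()
--     return dense
-- ===== SOURCE B (Python) =====
-- def deps_for(i: int) -> list[int]:
--     # Closed-form decomposition: the refill loop in A is dead and the sorted
--     # dedup equals (sorted distinct long-range extras below the window) ++ window.
--     if i <= 1:
--         return []
--     target = min(100, i - 1)
--     start = max(1, i - target)
--     extras = (i // 2, i // 3, i // 4, i // 5, i // 8)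
--     lo = sorted({x for x in extras if 1 <= x < start})
--     return lo + list(range(start, i))
-- ===== Notes on version B (the rewrite author's own statement) =====
-- stated objective: simpler
-- what changed: B replaces A's ordered-dedup loop over extras+window, the (dead) refill while-loop and the final sort by a direct decomposition: the sorted distinct long-range extras that fall strictly below the contiguous window, concatenated with the window range(start, i) itself.
import Mathlib
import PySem

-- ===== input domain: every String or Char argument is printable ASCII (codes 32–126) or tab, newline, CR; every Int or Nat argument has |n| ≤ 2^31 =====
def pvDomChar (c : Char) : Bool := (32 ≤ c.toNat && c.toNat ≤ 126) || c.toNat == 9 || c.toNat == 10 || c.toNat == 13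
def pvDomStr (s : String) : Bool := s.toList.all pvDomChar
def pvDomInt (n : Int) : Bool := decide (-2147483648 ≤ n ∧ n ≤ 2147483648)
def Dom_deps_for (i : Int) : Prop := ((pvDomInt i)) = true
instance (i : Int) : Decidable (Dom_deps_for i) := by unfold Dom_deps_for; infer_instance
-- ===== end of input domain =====

-- B replaces A's dedup-loop + dead refill-loop + sort by a direct decomposition:
-- sorted distinct extras below the window, followed by the contiguous window (objective: simpler).

-- ===== PORT A =====
-- the 'while len(dense) < target' refill loop, with fuel making the recursion structural
def deps_for_refill (target : Int) : Nat → Int → PySem.Set Int → List Int → List Int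
  | 0, _, _, dense => dense
  | fuel+1, dep, seen, dense =>
    if (dense.length : Int) < target then
      if PySem.Set.contains seen dep = false then
        deps_for_refill target fuel (dep - 1) (PySem.Set.add seen dep) (dense ++ [dep])
      else
        deps_for_refill target fuel (dep - 1) seen dense
    else dense

def deps_for (i : Int) : List Int :=
  if i ≤ 1 then [] else
    let target := min 100 (i - 1)
    let start := max 1 (i - target)
    let result := PySem.List.pyRange start i 1
    let extras := [PySem.Int.floordiv i 2, PySem.Int.floordiv i 3,
                   PySem.Int.floordiv i 4, PySem.Int.floordiv i 5, PySem.Int.floordiv i 8]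
    let sd := (extras ++ result).foldl
      (fun (p : PySem.Set Int × List Int) dep =>
        if 1 ≤ dep ∧ dep < i ∧ PySem.Set.contains p.1 dep = false then
          (PySem.Set.add p.1 dep, p.2 ++ [dep])
        else p) (PySem.Set.empty, [])
    let dense := deps_for_refill target (target.toNat + 1) (i - 1) sd.1 sd.2
    PySem.List.sorted dense (fun x => x) false

-- ===== PORT B =====
def deps_for_alt (i : Int) : List Int :=
  if i ≤ 1 then [] else
    let target := min 100 (i - 1)
    let start := max 1 (i - target)
    let extras := [PySem.Int.floordiv i 2, PySem.Int.floordiv i 3,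
                   PySem.Int.floordiv i 4, PySem.Int.floordiv i 5, PySem.Int.floordiv i 8]
    let lo := PySem.List.sorted
      (PySem.Set.ofList (extras.filter (fun x => decide (1 ≤ x ∧ x < start))))
      (fun x => x) false
    lo ++ PySem.List.pyRange start i 1

-- ===== PRECONDITION & SPEC =====
def Spec_deps_for (i : Int) (out : List Int) : Prop := out = deps_for_alt i
instance (i : Int) (out : List Int) : Decidable (Spec_deps_for i out) := by unfold Spec_deps_for; infer_instance

-- ===== CLAIM (what is proved, stated in full; the proofs are below) =====
def Claim_equal_deps_for : Prop := ∀ (i : Int), Dom_deps_for i → Spec_deps_for i (deps_for i)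

-- ===== LEMMAS AND PROOFS =====

-- the dedup fold keeps seen = dense, so it collapses to a single-list fold
def pvDedup (i : Int) (l : List Int) (d : List Int) : List Int :=
  l.foldl (fun d dep =>
    if 1 ≤ dep ∧ dep < i ∧ PySem.Set.contains d dep = false then d ++ [dep] else d) d

theorem pvContains_iff (d : List Int) (x : Int) :
    PySem.Set.contains d x = true ↔ x ∈ d := by
  simp [PySem.Set.contains]

theorem pvNotMem_of_contains_false (d : List Int) (x : Int)
    (h : PySem.Set.contains d x = false) : x ∉ d := by
  intro hm
  rw [(pvContains_iff d x).2 hm] at h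
  exact absurd h (by simp)

theorem pvFold_eq_dedup (i : Int) (l : List Int) (d : List Int) :
    l.foldl (fun (p : PySem.Set Int × List Int) dep =>
        if 1 ≤ dep ∧ dep < i ∧ PySem.Set.contains p.1 dep = false then
          (PySem.Set.add p.1 dep, p.2 ++ [dep])
        else p) (d, d) = (pvDedup i l d, pvDedup i l d) := by
  induction l generalizing d with
  | nil => simp [pvDedup]
  | cons a l ih =>
    simp only [pvDedup, List.foldl_cons]
    by_cases h : 1 ≤ a ∧ a < i ∧ PySem.Set.contains d a = false
    · rw [if_pos h, if_pos h]
      have hna : a ∉ d := pvNotMem_of_contains_false d a h.2.2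
      have : PySem.Set.add d a = d ++ [a] := by
        simp [PySem.Set.add, hna]
      rw [this]
      exact ih (d ++ [a])
    · rw [if_neg h, if_neg h]
      exact ih d

theorem pvDedup_mem (i : Int) (l : List Int) (d : List Int) (x : Int) :
    x ∈ pvDedup i l d ↔ x ∈ d ∨ (x ∈ l ∧ 1 ≤ x ∧ x < i) := by
  induction l generalizing d with
  | nil => simp [pvDedup]
  | cons a l ih =>
    simp only [pvDedup, List.foldl_cons]
    by_cases h : 1 ≤ a ∧ a < i ∧ PySem.Set.contains d a = false
    · rw [if_pos h]
      have hih := ih (d ++ [a])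
      simp only [pvDedup] at hih
      rw [hih]
      simp only [List.mem_append, List.mem_cons, List.not_mem_nil, or_false]
      constructor
      · rintro ((hx | rfl) | hx)
        · exact Or.inl hx
        · exact Or.inr ⟨Or.inl rfl, h.1, h.2.1⟩
        · exact Or.inr ⟨Or.inr hx.1, hx.2⟩
      · rintro (hx | ⟨(rfl | hx), hb⟩)
        · exact Or.inl (Or.inl hx)
        · exact Or.inl (Or.inr rfl)
        · exact Or.inr ⟨hx, hb⟩
    · rw [if_neg h]
      have hih := ih d
      simp only [pvDedup] at hih
      rw [hih]
      simp only [List.mem_cons]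
      constructor
      · rintro (hx | hx)
        · exact Or.inl hx
        · exact Or.inr ⟨Or.inr hx.1, hx.2⟩
      · rintro (hx | ⟨(rfl | hx), hb⟩)
        · exact Or.inl hx
        · -- bounds hold but the guard failed, so x was already in d
          by_cases hc : PySem.Set.contains d x = false
          · exact absurd ⟨hb.1, hb.2, hc⟩ h
          · refine Or.inl ((pvContains_iff d x).1 ?_)
            revert hc; cases PySem.Set.contains d x <;> simp
        · exact Or.inr ⟨hx, hb⟩

theorem pvDedup_nodup (i : Int) (l : List Int) (d : List Int) (hd : d.Nodup) :
    (pvDedup i l d).Nodup := by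
  induction l generalizing d with
  | nil => simpa [pvDedup]
  | cons a l ih =>
    simp only [pvDedup, List.foldl_cons]
    by_cases h : 1 ≤ a ∧ a < i ∧ PySem.Set.contains d a = false
    · rw [if_pos h]
      have hna : a ∉ d := pvNotMem_of_contains_false d a h.2.2
      refine ih (d ++ [a]) ?_
      rw [List.nodup_append]
      refine ⟨hd, List.nodup_singleton a, ?_⟩
      intro b hb c hc
      rw [List.mem_singleton] at hc
      subst hc
      exact fun e => hna (e ▸ hb)
    · rw [if_neg h]; exact ih d hd

-- ===== VERDICT (by name: the statement is the Claim_ definition above) =====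
theorem deps_for_spec : Claim_equal_deps_for := by
  intro i _
  unfold Spec_deps_for
  by_cases hi : i ≤ 1
  · simp [deps_for, deps_for_alt, hi]
  · simp only [deps_for, deps_for_alt, if_neg hi]
    have hi' : 1 < i := by omega
    set target := min 100 (i - 1) with htarget
    have htpos : 1 ≤ target ∧ target ≤ i - 1 := by omega
    have hstart : max 1 (i - target) = i - target := by omega
    rw [hstart]
    set start := i - target with hstartdef
    have hs1 : 1 ≤ start := by omega
    have hsi : start < i := by omega
    set extras := [PySem.Int.floordiv i 2, PySem.Int.floordiv i 3,
                   PySem.Int.floordiv i 4, PySem.Int.floordiv i 5, PySem.Int.floordiv i 8] with hextras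
    set R := PySem.List.pyRange start i 1 with hR
    -- the dedup fold over extras ++ R, starting from (∅, [])
    rw [show ((PySem.Set.empty : PySem.Set Int), ([] : List Int)) = (([] : List Int), ([] : List Int)) from rfl,
        pvFold_eq_dedup i (extras ++ R) []]
    set dense := pvDedup i (extras ++ R) [] with hdense
    have hmem : ∀ x, x ∈ dense ↔ (x ∈ extras ∨ x ∈ R) ∧ 1 ≤ x ∧ x < i := by
      intro x
      rw [hdense, pvDedup_mem]
      simp [List.mem_append]
    have hnodup : dense.Nodup := pvDedup_nodup i _ [] (by simp)
    -- R ⊆ dense, so dense has at least target elements and the refill loop exits at once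
    have hRsub : R ⊆ dense := by
      intro x hx
      have hxb : start ≤ x ∧ x < i := by
        rw [hR, PySem.List.mem_pyRange_one] at hx; exact hx
      exact (hmem x).2 ⟨Or.inr hx, by omega, hxb.2⟩
    have hRnodup : R.Nodup := by rw [hR]; exact PySem.List.nodup_pyRange_one start i
    have hlen : target ≤ (dense.length : Int) := by
      have hle := (List.subperm_of_subset hRnodup hRsub).length_le
      have hRlen : R.length = target.toNat := by
        rw [hR, PySem.List.length_pyRange_one]; congr 1; omega
      omega
    have hskip : deps_for_refill target (target.toNat + 1) (i - 1) dense dense = dense := by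
      unfold deps_for_refill
      rw [if_neg (by omega)]
    rw [hskip]
    -- B's value: (sorted distinct extras below start) ++ R, strictly increasing
    set lo := PySem.List.sorted
      (PySem.Set.ofList (extras.filter (fun x => decide (1 ≤ x ∧ x < start))))
      (fun x : Int => x) false with hlo
    have hlomem : ∀ x, x ∈ lo ↔ x ∈ extras ∧ 1 ≤ x ∧ x < start := by
      intro x
      rw [hlo, PySem.List.mem_sorted]
      simp [PySem.Set.mem_ofList, List.mem_filter]
    have hlopw : lo.Pairwise (· < ·) := by
      have := PySem.List.sorted_ofList_pairwise_lt
        (xs := extras.filter (fun x => decide (1 ≤ x ∧ x < start)))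
      simpa [hlo] using this
    have hRpw : R.Pairwise (· < ·) := by rw [hR]; exact PySem.List.pairwise_lt_pyRange_one start i
    have hLpw : (lo ++ R).Pairwise (· < ·) := by
      rw [List.pairwise_append]
      refine ⟨hlopw, hRpw, ?_⟩
      intro a ha b hb
      have ha' := (hlomem a).1 ha
      have hb' : start ≤ b ∧ b < i := by
        rw [hR, PySem.List.mem_pyRange_one] at hb; exact hb
      omega
    have hLnodup : (lo ++ R).Nodup := hLpw.imp (fun h => ne_of_lt h)
    have hLmem : ∀ x, x ∈ lo ++ R ↔ x ∈ dense := by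
      intro x
      rw [List.mem_append, hmem x, hlomem x]
      constructor
      · rintro (⟨hx, h1, h2⟩ | hx)
        · exact ⟨Or.inl hx, h1, by omega⟩
        · have hxb : start ≤ x ∧ x < i := by
            rw [hR, PySem.List.mem_pyRange_one] at hx; exact hx
          exact ⟨Or.inr hx, by omega, hxb.2⟩
      · rintro ⟨hx | hx, h1, h2⟩
        · by_cases hlt : x < start
          · exact Or.inl ⟨hx, h1, hlt⟩
          · exact Or.inr (by rw [hR, PySem.List.mem_pyRange_one]; omega)
        · exact Or.inr hx
    have hperm : (lo ++ R).Perm dense :=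
      (List.perm_ext_iff_of_nodup hLnodup hnodup).2 hLmem
    exact PySem.List.sorted_eq_of_perm_of_pairwise_lt (xs := dense) (ys := lo ++ R)
      (key := fun x : Int => x) hperm (by simpa using hLpw)
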